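-- pv_equiv track=rewrite | github.com/jingwangian/tutorial | python/hanker/shoes_shop.py | canculate_money
-- ===== SOURCE A (Python) =====
-- from collections import Counter
--
-- def canculate_money(shoes, customers):
-- 	shoes = Counter(shoes)
-- 	total_price = 0
-- 	for x in customers:
-- 		size = x[0]
-- 		if shoes[size]>0:
-- 			shoes[size] -=1
-- 			total_price +=x[1]
--
-- 	return total_price
-- ===== SOURCE B (Python) =====
-- from collections import Counter, defaultdict
--
-- def canculate_money(shoes, customers):
--     # Group each size's prices in encounter order, then serve the first
--     # min(stock, group size) customers of every size.
--     groups = defaultdict(list)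
--     for size, price in customers:
--         groups[size].append(price)
--     stock = Counter(shoes)
--     total = 0
--     for size, prices in groups.items():
--         total += sum(prices[:min(stock[size], len(prices))])
--     return total
-- ===== Notes on version B (the rewrite author's own statement) =====
-- stated objective: alternative
-- what changed: Replaces the in-order greedy loop that mutates a stock Counter per customer with a group-by structure: one pass buckets each size's prices in encounter order, then each bucket contributes the sum of its first min(stock, bucket length) prices.
import Mathlib
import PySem

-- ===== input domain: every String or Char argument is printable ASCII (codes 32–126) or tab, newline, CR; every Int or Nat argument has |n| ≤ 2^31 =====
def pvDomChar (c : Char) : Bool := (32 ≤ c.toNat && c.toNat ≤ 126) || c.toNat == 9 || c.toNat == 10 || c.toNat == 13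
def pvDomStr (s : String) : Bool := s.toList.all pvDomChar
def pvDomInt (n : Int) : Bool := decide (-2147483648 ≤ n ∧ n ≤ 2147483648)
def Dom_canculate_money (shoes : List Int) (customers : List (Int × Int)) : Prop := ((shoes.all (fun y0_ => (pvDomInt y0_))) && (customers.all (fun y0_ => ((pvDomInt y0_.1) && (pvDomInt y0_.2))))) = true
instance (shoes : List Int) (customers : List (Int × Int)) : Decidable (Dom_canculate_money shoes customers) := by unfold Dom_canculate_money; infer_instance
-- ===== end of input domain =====

-- B replaces A's in-order greedy loop over a mutable stock counter by a group-by
-- decomposition: bucket each size's prices in encounter order, then sum each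
-- bucket's first min(stock, bucket length) prices (alternative structure, same cost).

-- ===== PORT A =====
def canculate_money (shoes : List Int) (customers : List (Int × Int)) : Int :=
  let sh := PySem.Dict.counter shoes
  (customers.foldl (fun st x =>
      if st.1.getD x.1 0 > 0 then (st.1.modify x.1 0 (· - 1), st.2 + x.2)
      else st)
    (sh, (0 : Int))).2

-- ===== PORT B =====
def canculate_money_alt (shoes : List Int) (customers : List (Int × Int)) : Int :=
  let groups := customers.foldl (fun d p => d.modify p.1 [] (· ++ [p.2])) PySem.Dict.empty
  let stock := PySem.Dict.counter shoes
  groups.items.foldl (fun total p =>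
      total + (PySem.List.slice p.2 none (some (min (stock.getD p.1 0) (p.2.length : Int)))).sum)
    0

-- ===== PRECONDITION & SPEC =====
def Spec_canculate_money (shoes : List Int) (customers : List (Int × Int)) (out : Int) : Prop := out = canculate_money_alt shoes customers
instance (shoes : List Int) (customers : List (Int × Int)) (out : Int) : Decidable (Spec_canculate_money shoes customers out) := by unfold Spec_canculate_money; infer_instance

-- ===== CLAIM (what is proved, stated in full; the proofs are below) =====
def Claim_equal_canculate_money : Prop := ∀ (shoes : List Int) (customers : List (Int × Int)), Dom_canculate_money shoes customers → Spec_canculate_money shoes customers (canculate_money shoes customers)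

-- ===== LEMMAS AND PROOFS =====

-- sum of the first (min m len) prices of a bucket: B's per-bucket contribution
def pvSumTake (m : Int) (l : List Int) : Int :=
  (l.take (min m (l.length : Int)).toNat).sum

-- B's value expressed over an arbitrary stock dict c
def pvBval (c : PySem.Dict Int Int) (cs : List (Int × Int)) : Int :=
  ((PySem.Set.ofList (cs.map (·.1))).map
    (fun k => pvSumTake (c.getD k 0) ((cs.filter (fun p => p.1 == k)).map (·.2)))).sum

-- A's loop body
def pvStep (st : PySem.Dict Int Int × Int) (x : Int × Int) : PySem.Dict Int Int × Int :=
  if st.1.getD x.1 0 > 0 then (st.1.modify x.1 0 (· - 1), st.2 + x.2) else st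

theorem pvStep_offset (cs : List (Int × Int)) : ∀ (d : PySem.Dict Int Int) (t : Int),
    (cs.foldl pvStep (d, t)).2 = t + (cs.foldl pvStep (d, 0)).2 := by
  induction cs with
  | nil => intro d t; simp
  | cons x rest ih =>
    intro d t
    simp only [List.foldl_cons, pvStep]
    split_ifs with h
    · rw [ih, ih (d.modify x.1 0 (· - 1)) (0 + x.2)]; ring
    · rw [ih, ih d 0]

theorem pvSumTake_nil (m : Int) : pvSumTake m [] = 0 := by
  simp [pvSumTake]

theorem pvSumTake_cons_pos (m p : Int) (l : List Int) (h : 0 < m) :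
    pvSumTake m (p :: l) = p + pvSumTake (m - 1) l := by
  unfold pvSumTake
  have h1 : (min m ((p :: l).length : Int)).toNat = (min (m - 1) (l.length : Int)).toNat + 1 := by
    simp only [List.length_cons]; push_cast; omega
  rw [h1, List.take_succ_cons, List.sum_cons]

theorem pvSumTake_nonpos (m : Int) (l : List Int) (h : m ≤ 0) : pvSumTake m l = 0 := by
  unfold pvSumTake
  have h1 : (min m (l.length : Int)).toNat = 0 := by omega
  rw [h1, List.take_zero, List.sum_nil]

-- summing f over a Nodup list = f at s (if present) + the sum over the list with s discarded
theorem pvSum_discard (T : List Int) (hT : T.Nodup) (f : Int → Int) (s : Int) :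
    (T.map f).sum = (if s ∈ T then f s else 0) + ((PySem.Set.discard T s).map f).sum := by
  by_cases hs : s ∈ T
  · have hperm : T.Perm (s :: PySem.Set.discard T s) := by
      have h1 := List.perm_cons_erase hs
      rw [hT.erase_eq_filter] at h1
      exact h1
    have h2 := (hperm.map f).sum_eq
    simp [h2, hs]
  · have h3 : PySem.Set.discard T s = T := by
      rw [PySem.Set.discard, List.filter_eq_self]
      intro y hy
      simp only [Bool.not_eq_eq_eq_not, Bool.not_true, beq_eq_false_iff_ne, ne_eq]
      exact fun h => hs (h ▸ hy)
    simp [hs, h3]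

-- the invariant: A's greedy loop from any stock dict c computes B's group-by value over c
theorem pvMain (cs : List (Int × Int)) : ∀ (c : PySem.Dict Int Int),
    (cs.foldl pvStep (c, 0)).2 = pvBval c cs := by
  induction cs with
  | nil => intro c; simp [pvBval]
  | cons x rest ih =>
    intro c
    obtain ⟨s, p⟩ := x
    have hT : PySem.Set.ofList (((s, p) :: rest).map (·.1))
        = s :: PySem.Set.discard (PySem.Set.ofList (rest.map (·.1))) s := by
      rw [show ((s, p) :: rest).map (·.1) = s :: rest.map (·.1) from rfl, PySem.Set.ofList_cons]
    have hnd : (PySem.Set.ofList (rest.map (·.1))).Nodup := PySem.Set.nodup_ofList _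
    have hfilter_s : (((s, p) :: rest).filter (fun q => q.1 == s)) = (s, p) :: rest.filter (fun q => q.1 == s) := by
      simp
    have hfilter_ne : ∀ k, k ≠ s → (((s, p) :: rest).filter (fun q => q.1 == k)) = rest.filter (fun q => q.1 == k) := by
      intro k hk
      simp [Ne.symm hk]
    have hrhs : pvBval c ((s, p) :: rest)
        = pvSumTake (c.getD s 0) (p :: (rest.filter (fun q => q.1 == s)).map (·.2))
          + ((PySem.Set.discard (PySem.Set.ofList (rest.map (·.1))) s).map
              (fun k => pvSumTake (c.getD k 0) ((rest.filter (fun q => q.1 == k)).map (·.2)))).sum := by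
      unfold pvBval
      rw [hT, List.map_cons, List.sum_cons]
      congr 1
      · rw [hfilter_s, List.map_cons]
      · apply congrArg List.sum
        apply List.map_congr_left
        intro k hk
        rw [hfilter_ne k ((PySem.Set.mem_discard _ _ _).mp hk).2]
    rw [List.foldl_cons, hrhs]
    by_cases h : c.getD s 0 > 0
    · have hstep : pvStep (c, 0) (s, p) = (c.modify s 0 (· - 1), 0 + p) := by
        simp [pvStep, h]
      rw [hstep, pvStep_offset, ih]
      have hB : pvBval (c.modify s 0 (· - 1)) rest
          = (if s ∈ PySem.Set.ofList (rest.map (·.1)) then pvSumTake (c.getD s 0 - 1) ((rest.filter (fun q => q.1 == s)).map (·.2)) else 0)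
            + ((PySem.Set.discard (PySem.Set.ofList (rest.map (·.1))) s).map
                (fun k => pvSumTake (c.getD k 0) ((rest.filter (fun q => q.1 == k)).map (·.2)))).sum := by
        unfold pvBval
        rw [pvSum_discard _ hnd _ s]
        congr 1
        · rw [PySem.Dict.getD_modify_self]
        · apply congrArg List.sum
          apply List.map_congr_left
          intro k hk
          rw [PySem.Dict.getD_modify_of_ne _ _ _ ((PySem.Set.mem_discard _ _ _).mp hk).2]
      rw [hB]
      by_cases hs : s ∈ PySem.Set.ofList (rest.map (·.1))
      · rw [if_pos hs, pvSumTake_cons_pos _ _ _ h]; ring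
      · have hLs : rest.filter (fun q => q.1 == s) = [] := by
          rw [List.filter_eq_nil_iff]
          intro q hq
          simp only [beq_iff_eq]
          intro he
          exact hs ((PySem.Set.mem_ofList _ _).mpr (List.mem_map.mpr ⟨q, hq, he⟩))
        rw [if_neg hs, hLs]
        rw [show ((List.nil : List (Int × Int)).map (·.2)) = ([] : List Int) from rfl]
        rw [pvSumTake_cons_pos _ _ _ h, pvSumTake_nil]
        ring
    · have hstep : pvStep (c, 0) (s, p) = (c, 0) := by
        simp [pvStep, h]
      rw [hstep, ih]
      have hle : c.getD s 0 ≤ 0 := by omega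
      unfold pvBval
      rw [pvSum_discard _ hnd _ s]
      simp [pvSumTake_nonpos _ _ hle]

-- ===== VERDICT (by name: the statement is the Claim_ definition above) =====
theorem canculate_money_spec : Claim_equal_canculate_money := by
  intro shoes customers _
  show canculate_money shoes customers = canculate_money_alt shoes customers
  have hA : canculate_money shoes customers = (customers.foldl pvStep (PySem.Dict.counter shoes, 0)).2 := rfl
  rw [hA, pvMain]
  symm
  show (customers.foldl (fun d p => d.modify p.1 [] (· ++ [p.2])) PySem.Dict.empty).items.foldl
      (fun total p => total + (PySem.List.slice p.2 none (some (min ((PySem.Dict.counter shoes).getD p.1 0) (p.2.length : Int)))).sum) 0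
      = pvBval (PySem.Dict.counter shoes) customers
  set G := customers.foldl (fun d p => d.modify p.1 [] (· ++ [p.2])) PySem.Dict.empty with hG
  have hnd : G.keys.Nodup := PySem.Dict.nodup_keys_foldl_modify_key customers (fun p => p.1) [] (fun _ p v => v ++ [p.2]) PySem.Dict.empty PySem.Dict.nodup_keys_empty
  have hkeys : G.keys = PySem.Set.ofList (customers.map (·.1)) := by
    rw [hG, PySem.Dict.keys_foldl_modify_key customers (fun p => p.1) [] (fun _ p v => v ++ [p.2])]
    rfl
  have hgetD : ∀ k, G.getD k [] = (customers.filter (fun q => q.1 == k)).map (·.2) := by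
    intro k; rw [hG, PySem.Dict.getD_foldl_modify_append]; simp
  rw [PySem.List.foldl_add, PySem.Dict.items_eq_map_keys G hnd []]
  rw [List.map_map, hkeys]
  unfold pvBval
  simp only [zero_add]
  apply congrArg List.sum
  apply List.map_congr_left
  intro k hk
  simp only [Function.comp]
  rw [hgetD k]
  have hnn : 0 ≤ min ((PySem.Dict.counter shoes).getD k 0) ((((customers.filter (fun q => q.1 == k)).map (·.2)).length : Int)) := by
    rw [PySem.Dict.getD_counter]
    exact le_min (Int.natCast_nonneg _) (Int.natCast_nonneg _)
  rw [PySem.List.slice_to _ hnn]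
  rfl
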